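-- pv_equiv track=rewrite | github.com/jano31415/codejam | codeforces/codeton_8/probc.py | solve
-- ===== SOURCE A (Python) =====
-- def solve(n,x,y,chosen):
--     # increase the condition as much as possible.
--     res = x-2
--     chosen.sort()
--     diff_array = []
--     for i in range(x-1):
--         diff = chosen[i+1] - chosen[i]
--         if diff == 1:
--             continue
--         elif diff == 2:
--             res+=1
--         else:
--             diff_array.append(diff)
--     # cycle
--     diff =(n+chosen[0]) - chosen[-1] # n= 7, -1 is 7, 0 is 1
--     if diff == 1:
--         pass
--     elif diff == 2:
--         res += 1
--     else:
--         diff_array.append(diff)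
--     evens = [d for d in diff_array if d%2 == 0]
--     evens.sort()
--     odds = [d for d in diff_array if d%2 == 1]
--     odds.sort()
--     yused = 0
--     for even in evens:
--         if y > yused:
--             use = (even-1) // 2
--             if y-yused >= use:
--                 yused +=use
--                 res+= 2*use+1
--             else:
--                 use = y-yused
--                 yused += use
--                 res+= 2*use # if not full then no plus 1
--                 break
--         else:
--             break
--     for odd in odds:
--         if y > yused:
--             use = min(y-yused, (odd-1)//2)
--             yused+=use
--             res+=2*use
--         else:
--             break
--     return res
-- ===== SOURCE B (Python) =====
-- def solve(n, x, y, chosen):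
--     # B: no budget simulation. Classify gaps once, then compute the answer
--     # arithmetically: total placed units = capped sum of gap capacities, and the
--     # +1 bonus per fully-used even gap = how many ascending even-capacity prefix
--     # sums fit in y. (Sorts `chosen` in place, like A.)
--     chosen.sort()
--     gaps = [chosen[i + 1] - chosen[i] for i in range(x - 1)]
--     gaps.append(n + chosen[0] - chosen[-1])
--     base = x - 2 + sum(d == 2 for d in gaps)
--     if y <= 0:
--         return base
--     ec = [(d - 1) // 2 for d in sorted(d for d in gaps if d % 2 == 0 and d != 2)]
--     so = sum((d - 1) // 2 for d in gaps if d % 2 == 1 and d != 1)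
--     se = sum(ec)
--     units = y if se >= y else min(y, se + so)
--     bonus = 0
--     p = 0
--     for c in ec:
--         p += c
--         if p <= y:
--             bonus += 1
--     return base + 2 * units + bonus
-- ===== Notes on version B (the rewrite author's own statement) =====
-- stated objective: simpler
-- what changed: B eliminates A's greedy budget simulation entirely: instead of the two stateful break-based loops that allocate y unit by unit over sorted even then odd gaps, B computes the answer arithmetically - total placed units is a capped sum (y if even capacity >= y, else min(y, total capacity)) and the +1-per-fully-filled-even bonus is a prefix-sum count over the ascending even capacities.
import Mathlib
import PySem

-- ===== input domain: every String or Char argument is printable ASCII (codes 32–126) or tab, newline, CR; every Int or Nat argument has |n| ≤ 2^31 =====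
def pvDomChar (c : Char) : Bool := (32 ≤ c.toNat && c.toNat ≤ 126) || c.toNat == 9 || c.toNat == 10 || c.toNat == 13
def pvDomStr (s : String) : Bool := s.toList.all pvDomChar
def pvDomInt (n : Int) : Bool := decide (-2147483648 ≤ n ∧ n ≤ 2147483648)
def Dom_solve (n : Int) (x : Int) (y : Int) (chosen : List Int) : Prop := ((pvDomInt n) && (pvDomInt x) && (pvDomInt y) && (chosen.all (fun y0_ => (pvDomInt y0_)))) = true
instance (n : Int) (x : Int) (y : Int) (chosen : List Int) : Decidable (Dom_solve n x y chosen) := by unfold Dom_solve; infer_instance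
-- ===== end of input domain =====

-- B replaces A's two stateful break-based budget loops by closed-form arithmetic:
-- units = capped capacity sum, even bonus = prefix-sum count (objective: simpler).
-- Both A and B sort `chosen` in place; the equivalence proved is about the return value.

-- ===== PORT A =====
-- (d - 1) // 2, the capacity of a gap d — named once, used by both ports
def capf (d : Int) : Int := PySem.Int.floordiv (d - 1) 2

-- A's even loop with break: structural recursion over the sorted even gaps, state (yused, res)
def evenLoopA (y : Int) : List Int → Int × Int → Int × Int
  | [], st => st
  | e :: rest, (yused, res) =>
    if yused < y then
      let use := capf e
      if use ≤ y - yused then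
        evenLoopA y rest (yused + use, res + (2 * use + 1))
      else
        (yused + (y - yused), res + 2 * (y - yused))   -- break
    else (yused, res)                                  -- break

-- A's odd loop with break
def oddLoopA (y : Int) : List Int → Int × Int → Int × Int
  | [], st => st
  | o :: rest, (yused, res) =>
    if yused < y then
      let use := min (y - yused) (capf o)
      oddLoopA y rest (yused + use, res + 2 * use)
    else (yused, res)                                  -- break

-- pyGetD with default 0 is exact under Pre_solve (all indices are in range there)
def solve (n : Int) (x : Int) (y : Int) (chosen : List Int) : Int :=
  let sc := PySem.List.sorted chosen (fun v => v) false
  let st := (PySem.List.pyRange 0 (x - 1) 1).foldl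
      (fun (st : Int × List Int) i =>
        let diff := PySem.List.pyGetD sc (i + 1) 0 - PySem.List.pyGetD sc i 0
        if diff = 1 then st
        else if diff = 2 then (st.1 + 1, st.2)
        else (st.1, st.2 ++ [diff]))
      (x - 2, ([] : List Int))
  let diff := (n + PySem.List.pyGetD sc 0 0) - PySem.List.pyGetD sc (-1) 0
  let st2 := if diff = 1 then st
             else if diff = 2 then (st.1 + 1, st.2)
             else (st.1, st.2 ++ [diff])
  let evens := PySem.List.sorted (st2.2.filter (fun d => PySem.Int.mod d 2 == 0)) (fun v => v) false
  let odds := PySem.List.sorted (st2.2.filter (fun d => PySem.Int.mod d 2 == 1)) (fun v => v) false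
  (oddLoopA y odds (evenLoopA y evens (0, st2.1))).2

-- ===== PORT B =====
-- B's prefix-sum bonus counter: state (p = running prefix, b = count of prefixes ≤ y)
def bonusScan (y : Int) : List Int → Int → Int → Int
  | [], _, b => b
  | c :: rest, p, b => bonusScan y rest (p + c) (if p + c ≤ y then b + 1 else b)

def solve_alt (n : Int) (x : Int) (y : Int) (chosen : List Int) : Int :=
  let sc := PySem.List.sorted chosen (fun v => v) false
  let gaps := (PySem.List.pyRange 0 (x - 1) 1).map
      (fun i => PySem.List.pyGetD sc (i + 1) 0 - PySem.List.pyGetD sc i 0)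
      ++ [n + PySem.List.pyGetD sc 0 0 - PySem.List.pyGetD sc (-1) 0]
  let base := x - 2 + ((gaps.filter (fun d => d == 2)).length : Int)
  if y ≤ 0 then base
  else
    let ec := (PySem.List.sorted (gaps.filter (fun d => PySem.Int.mod d 2 == 0 && d != 2))
        (fun v => v) false).map capf
    let so := ((gaps.filter (fun d => PySem.Int.mod d 2 == 1 && d != 1)).map capf).sum
    let se := ec.sum
    let units := if se ≥ y then y else min y (se + so)
    let bonus := bonusScan y ec 0 0
    base + 2 * units + bonus

-- ===== PRECONDITION & SPEC =====
-- Pre_solve excludes exactly the inputs where the Python A raises IndexError: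
-- empty `chosen` (chosen[0]/chosen[-1]) or x > len(chosen) (chosen[i+1] in the gap loop).
def Pre_solve (n : Int) (x : Int) (y : Int) (chosen : List Int) : Prop :=
  chosen ≠ [] ∧ x ≤ (chosen.length : Int)
instance (n : Int) (x : Int) (y : Int) (chosen : List Int) : Decidable (Pre_solve n x y chosen) := by
  unfold Pre_solve; infer_instance

def pvWitness_solve : Int × Int × Int × List Int := (7, 3, 1, [1, 3, 6])

def Spec_solve (n : Int) (x : Int) (y : Int) (chosen : List Int) (out : Int) : Prop := out = solve_alt n x y chosen
instance (n : Int) (x : Int) (y : Int) (chosen : List Int) (out : Int) : Decidable (Spec_solve n x y chosen out) := by unfold Spec_solve; infer_instance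

-- ===== CLAIM (what is proved, stated in full; the proofs are below) =====
def Claim_equal_solve : Prop := ∀ (n : Int) (x : Int) (y : Int) (chosen : List Int), Dom_solve n x y chosen → Pre_solve n x y chosen → Spec_solve n x y chosen (solve n x y chosen)

-- ===== LEMMAS AND PROOFS =====

lemma capf_mono {a b : Int} (h : a ≤ b) : capf a ≤ capf b := by
  unfold capf
  rw [PySem.Int.floordiv_eq_ediv_of_pos (by norm_num),
      PySem.Int.floordiv_eq_ediv_of_pos (by norm_num)]
  exact Int.ediv_le_ediv (by norm_num) (by omega)

lemma bonusScan_add (y : Int) (L : List Int) :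
    ∀ p b, bonusScan y L p b = b + bonusScan y L p 0 := by
  induction L with
  | nil => intro p b; simp [bonusScan]
  | cons c rest ih =>
    intro p b
    simp only [bonusScan]
    rw [ih (p + c) (if p + c ≤ y then b + 1 else b),
        ih (p + c) (if p + c ≤ y then 0 + 1 else 0)]
    split_ifs <;> omega

lemma bonusScan_zero (y : Int) (L : List Int) (h : ∀ c ∈ L, 1 ≤ c) :
    ∀ p, y ≤ p → bonusScan y L p 0 = 0 := by
  induction L with
  | nil => intro p _; rfl
  | cons c rest ih =>
    intro p hp
    have hc : 1 ≤ c := h c (by simp)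
    simp only [bonusScan, if_neg (by omega : ¬ p + c ≤ y)]
    exact ih (fun e he => h e (by simp [he])) (p + c) (by omega)

lemma caps_sum_nonneg (L : List Int) (h : ∀ c ∈ L, 1 ≤ c) : 0 ≤ L.sum :=
  List.sum_nonneg (fun c hc => by have := h c hc; omega)

-- once yused ≥ y, A's loops do nothing
lemma evenLoopA_stop (y : Int) (L : List Int) (u r : Int) (h : ¬ u < y) :
    evenLoopA y L (u, r) = (u, r) := by
  cases L with
  | nil => rfl
  | cons e rest => simp [evenLoopA, h]

lemma oddLoopA_stop (y : Int) (L : List Int) (u r : Int) (h : ¬ u < y) :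
    oddLoopA y L (u, r) = (u, r) := by
  cases L with
  | nil => rfl
  | cons o rest => simp [oddLoopA, h]

-- the even phase in closed form: final yused = min(y, u + capacity sum),
-- score gain = 2*(units used) + (number of capacity prefixes ≤ y)
lemma evenA_char (y : Int) :
    ∀ (L : List Int), (L.map capf).Pairwise (· ≤ ·) →
    ∀ u r, u ≤ y → (u = y → ∀ c ∈ L.map capf, 1 ≤ c) →
      evenLoopA y L (u, r)
        = (min y (u + (L.map capf).sum),
           r + 2 * (min y (u + (L.map capf).sum) - u) + bonusScan y (L.map capf) u 0) := by
  intro L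
  induction L with
  | nil =>
    intro _ u r hu _
    simp only [List.map_nil, List.sum_nil, evenLoopA, bonusScan]
    rw [show min y (u + 0) = u by omega]
    simp
  | cons e rest ih =>
    intro hp u r hu hclause
    rw [List.map_cons, List.pairwise_cons] at hp
    obtain ⟨hhead, htail⟩ := hp
    by_cases hlt : u < y
    · by_cases hfull : capf e ≤ y - u
      · -- full take: recurse
        simp only [evenLoopA, if_pos hlt, if_pos hfull]
        have hclause' : u + capf e = y → ∀ c ∈ rest.map capf, 1 ≤ c := by
          intro he c hc
          have := hhead c hc; omega
        rw [ih htail (u + capf e) (r + (2 * capf e + 1)) (by omega) hclause']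
        simp only [List.map_cons, List.sum_cons, bonusScan, if_pos (by omega : u + capf e ≤ y)]
        rw [bonusScan_add y (rest.map capf) (u + capf e) (0 + 1)]
        simp only [Prod.mk.injEq]
        constructor <;> omega
      · -- partial take: budget exhausted here
        have hcap1 : 1 ≤ capf e := by omega
        have hrest1 : ∀ c ∈ rest.map capf, 1 ≤ c := fun c hc => by
          have := hhead c hc; omega
        have hsum : 0 ≤ (rest.map capf).sum := caps_sum_nonneg _ hrest1
        simp only [evenLoopA, if_pos hlt, if_neg hfull]
        simp only [List.map_cons, List.sum_cons, bonusScan,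
          if_neg (by omega : ¬ u + capf e ≤ y)]
        rw [bonusScan_zero y (rest.map capf) hrest1 (u + capf e) (by omega)]
        simp only [Prod.mk.injEq]
        constructor <;> omega
    · -- u = y: loop stops immediately
      have hu' : u = y := by omega
      have hcaps := hclause hu'
      have hsum : 0 ≤ ((e :: rest).map capf).sum := caps_sum_nonneg _ hcaps
      rw [evenLoopA_stop y (e :: rest) u r hlt,
          bonusScan_zero y ((e :: rest).map capf) hcaps u (by omega)]
      simp only [Prod.mk.injEq]
      constructor <;> omega

-- the odd phase in closed form: final yused = min(y, u + capacity sum), gain = 2*(units used)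
lemma oddA_char (y : Int) :
    ∀ (L : List Int), (L.map capf).Pairwise (· ≤ ·) →
    ∀ u r, u ≤ y → (u = y → ∀ c ∈ L.map capf, 1 ≤ c) →
      oddLoopA y L (u, r)
        = (min y (u + (L.map capf).sum),
           r + 2 * (min y (u + (L.map capf).sum) - u)) := by
  intro L
  induction L with
  | nil =>
    intro _ u r hu _
    simp only [List.map_nil, List.sum_nil, oddLoopA]
    rw [show min y (u + 0) = u by omega]
    simp
  | cons o rest ih =>
    intro hp u r hu hclause
    rw [List.map_cons, List.pairwise_cons] at hp
    obtain ⟨hhead, htail⟩ := hp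
    by_cases hlt : u < y
    · by_cases hfull : capf o ≤ y - u
      · simp only [oddLoopA, if_pos hlt,
          show min (y - u) (capf o) = capf o by omega]
        have hclause' : u + capf o = y → ∀ c ∈ rest.map capf, 1 ≤ c := by
          intro ho c hc
          have := hhead c hc; omega
        rw [ih htail (u + capf o) (r + 2 * capf o) (by omega) hclause']
        simp only [List.map_cons, List.sum_cons, Prod.mk.injEq]
        constructor <;> omega
      · have hcap1 : 1 ≤ capf o := by omega
        have hrest1 : ∀ c ∈ rest.map capf, 1 ≤ c := fun c hc => by
          have := hhead c hc; omega
        have hsum : 0 ≤ (rest.map capf).sum := caps_sum_nonneg _ hrest1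
        simp only [oddLoopA, if_pos hlt,
          show min (y - u) (capf o) = y - u by omega]
        rw [oddLoopA_stop y rest (u + (y - u)) (r + 2 * (y - u)) (by omega)]
        simp only [List.map_cons, List.sum_cons, Prod.mk.injEq]
        constructor <;> omega
    · have hu' : u = y := by omega
      have hcaps := hclause hu'
      have hsum : 0 ≤ ((o :: rest).map capf).sum := caps_sum_nonneg _ hcaps
      rw [oddLoopA_stop y (o :: rest) u r hlt]
      simp only [Prod.mk.injEq]
      constructor <;> omega

-- A's classification fold over a list of gap values
lemma classify_foldl (L : List Int) (r : Int) (acc : List Int) :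
    L.foldl (fun (st : Int × List Int) diff =>
        if diff = 1 then st
        else if diff = 2 then (st.1 + 1, st.2)
        else (st.1, st.2 ++ [diff])) (r, acc)
    = (r + ((L.filter (fun d => d == 2)).length : Int),
       acc ++ L.filter (fun d => d != 1 && d != 2)) := by
  induction L generalizing r acc with
  | nil => simp
  | cons d rest ih =>
    simp only [List.foldl_cons, List.filter_cons]
    by_cases h1 : d = 1
    · subst h1; simp [ih]
    · by_cases h2 : d = 2
      · subst h2; simp only [List.foldl_cons]; norm_num
        rw [ih]; simp; omega
      · rw [if_neg h1, if_neg h2, ih]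
        simp only [show (d == 2) = false by simp [h2],
          show (d != 1 && d != 2) = true by simp [h1, h2]]
        simp

-- filtering the even (resp. odd) gaps out of the ≠1,≠2 survivors = one filter on all gaps
lemma even_filter (gaps : List Int) :
    (gaps.filter (fun d => d != 1 && d != 2)).filter (fun d => PySem.Int.mod d 2 == 0)
      = gaps.filter (fun d => PySem.Int.mod d 2 == 0 && d != 2) := by
  rw [List.filter_filter]
  apply List.filter_congr
  intro a _
  by_cases h1 : a = 1
  · subst h1; decide
  · have h : (a != 1) = true := by simp [h1]
    rw [h, Bool.true_and, Bool.and_comm]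

lemma odd_filter (gaps : List Int) :
    (gaps.filter (fun d => d != 1 && d != 2)).filter (fun d => PySem.Int.mod d 2 == 1)
      = gaps.filter (fun d => PySem.Int.mod d 2 == 1 && d != 1) := by
  rw [List.filter_filter]
  apply List.filter_congr
  intro a _
  by_cases h2 : a = 2
  · subst h2; decide
  · have h : (a != 2) = true := by simp [h2]
    rw [show (a != 1 && a != 2) = (a != 1) by rw [h, Bool.and_true], Bool.and_comm]

-- capacities of a PySem-sorted list are pairwise ≤
lemma caps_pairwise (L : List Int) :
    ((PySem.List.sorted L (fun v => v) false).map capf).Pairwise (· ≤ ·) := by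
  apply List.Pairwise.map
  · exact fun a b h => capf_mono h
  · exact PySem.List.sorted_pairwise L (fun v => v)

-- ===== VERDICT (by name: the statement is the Claim_ definition above) =====
theorem solve_spec : Claim_equal_solve := by
  intro n x y chosen _ _
  show solve n x y chosen = solve_alt n x y chosen
  simp only [solve, solve_alt]
  set sc := PySem.List.sorted chosen (fun v => v) false with hsc
  set gaps := (PySem.List.pyRange 0 (x - 1) 1).map
      (fun i => PySem.List.pyGetD sc (i + 1) 0 - PySem.List.pyGetD sc i 0)
      ++ [n + PySem.List.pyGetD sc 0 0 - PySem.List.pyGetD sc (-1) 0] with hgaps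
  -- A's fold over the range = classification of the interior gaps
  rw [← List.foldl_map (f := fun i => PySem.List.pyGetD sc (i + 1) 0 - PySem.List.pyGetD sc i 0)
      (g := fun (st : Int × List Int) diff =>
        if diff = 1 then st
        else if diff = 2 then (st.1 + 1, st.2)
        else (st.1, st.2 ++ [diff]))]
  rw [classify_foldl]
  have hstep : ∀ (st : Int × List Int) (diff : Int),
      (if diff = 1 then st else if diff = 2 then (st.1 + 1, st.2) else (st.1, st.2 ++ [diff]))
      = [diff].foldl (fun (st : Int × List Int) diff =>
          if diff = 1 then st
          else if diff = 2 then (st.1 + 1, st.2)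
          else (st.1, st.2 ++ [diff])) st := by
    intro st diff; simp
  rw [hstep, classify_foldl]
  simp only [← List.filter_append, ← hgaps, List.nil_append, even_filter, odd_filter]
  -- name the pieces (now shared between the two sides)
  set E := PySem.List.sorted (gaps.filter (fun d => PySem.Int.mod d 2 == 0 && d != 2))
      (fun v => v) false with hE
  set O := PySem.List.sorted (gaps.filter (fun d => PySem.Int.mod d 2 == 1 && d != 1))
      (fun v => v) false with hO
  set se := (E.map capf).sum with hse
  set soB := ((gaps.filter (fun d => PySem.Int.mod d 2 == 1 && d != 1)).map capf).sum with hsoB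
  have hso : (O.map capf).sum = soB := by
    rw [hO, hsoB]
    exact List.Perm.sum_eq (List.Perm.map capf
      (PySem.List.sorted_perm (gaps.filter (fun d => PySem.Int.mod d 2 == 1 && d != 1))
        (fun v => v) false))
  -- the two gap-count pieces on A's side sum to B's single count
  have hcnt : (gaps.filter (fun d => d == 2)).length
      = (((PySem.List.pyRange 0 (x - 1) 1).map
            (fun i => PySem.List.pyGetD sc (i + 1) 0 - PySem.List.pyGetD sc i 0)).filter
          (fun d => d == 2)).length
        + ([n + PySem.List.pyGetD sc 0 0 - PySem.List.pyGetD sc (-1) 0].filter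
            (fun d => d == 2)).length := by
    rw [hgaps, List.filter_append, List.length_append]
  set base : Int := x - 2 + ((gaps.filter (fun d => d == 2)).length : Int) with hbase
  set baseA : Int := x - 2
      + ((((PySem.List.pyRange 0 (x - 1) 1).map
            (fun i => PySem.List.pyGetD sc (i + 1) 0 - PySem.List.pyGetD sc i 0)).filter
          (fun d => d == 2)).length : Int)
      + (([n + PySem.List.pyGetD sc 0 0 - PySem.List.pyGetD sc (-1) 0].filter
            (fun d => d == 2)).length : Int) with hbaseA
  have hbb : baseA = base := by rw [hbase, hbaseA, hcnt]; push_cast; ring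
  by_cases hy : y ≤ 0
  · -- no budget: both allocation phases are no-ops
    rw [if_pos hy,
        evenLoopA_stop y E 0 baseA (by omega),
        oddLoopA_stop y O 0 baseA (by omega)]
    exact hbb
  · rw [if_neg hy]
    have hEchar := evenA_char y E (caps_pairwise _) 0 baseA (by omega)
      (fun h0 => absurd h0 (by omega))
    rw [hEchar]
    by_cases hge : se ≥ y
    · -- evens already absorb the whole budget: odd loop is a no-op
      have hmin : min y (0 + se) = y := by omega
      rw [hmin, oddLoopA_stop y O y _ (by omega), if_pos hge]
      omega
    · -- evens all consumed: odd loop starts at se < y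
      have hmin : min y (0 + se) = se := by omega
      rw [hmin,
          oddA_char y O (caps_pairwise _) se _ (by omega)
            (fun h0 => absurd h0 (by omega)),
          hso, if_neg hge]
      omega
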